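-- pv_equiv track=rewrite | github.com/HashemBader/Harvester-Project | src/utils/nlmcn_validator.py | _is_valid_nlmcn_remainder
-- ===== SOURCE A (Python) =====
-- def _is_valid_nlmcn_remainder(remainder: str) -> bool:
--     """Validate the inline decimal extension of an NLM class number token."""
--     if not remainder:
--         return True
--
--     # If there is a remainder, it must start with a decimal point.
--     if not remainder.startswith("."):
--         return False
--
--     # Split by periods to handle multi-level extensions.
--     segments = remainder.split(".")
--     # Each segment after the first decimal must be alphanumeric.
--     for segment in segments[1:]:
--         if not segment:
--             continue
--         if not segment.isalnum():
--             return False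
--
--     return True
-- ===== SOURCE B (Python) =====
-- def _is_valid_nlmcn_remainder(remainder: str) -> bool:
--     """Validate the inline decimal extension of an NLM class number token."""
--     if not remainder:
--         return True
--     if remainder[0] != ".":
--         return False
--     # Single character scan: every char is a period or alphanumeric.
--     return all(c == "." or c.isalnum() for c in remainder)
-- ===== Notes on version B (the rewrite author's own statement) =====
-- stated objective: simpler
-- what changed: Replaces the split-on-period plus per-segment loop with one flat character scan (each char must be a period or alphanumeric); no segment list is built.
import Mathlib
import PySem

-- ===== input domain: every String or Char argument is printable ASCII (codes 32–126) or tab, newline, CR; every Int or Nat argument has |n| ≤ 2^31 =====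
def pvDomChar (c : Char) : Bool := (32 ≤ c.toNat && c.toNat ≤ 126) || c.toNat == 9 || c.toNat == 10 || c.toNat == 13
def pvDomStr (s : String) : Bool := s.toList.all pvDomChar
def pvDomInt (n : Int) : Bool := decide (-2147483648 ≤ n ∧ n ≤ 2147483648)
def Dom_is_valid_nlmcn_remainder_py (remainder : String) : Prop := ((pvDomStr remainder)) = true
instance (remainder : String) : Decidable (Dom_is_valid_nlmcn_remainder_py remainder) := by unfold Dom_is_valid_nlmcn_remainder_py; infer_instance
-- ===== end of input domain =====

-- B replaces A's split('.')-and-per-segment loop by a single flat character scan; objective: simpler.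


-- ===== PORT A =====
def is_valid_nlmcn_remainder_py (remainder : String) : Bool :=
  if remainder.toList.isEmpty then true
  else if !(PySem.Str.startswith remainder ".") then false
  else
    let segments := PySem.Chars.splitOn remainder.toList ['.']
    segments.tail.all (fun segment => segment.isEmpty || PySem.Chars.strIsalnum segment)

-- ===== PORT B =====
def is_valid_nlmcn_remainder_py_alt (remainder : String) : Bool :=
  if remainder.toList.isEmpty then true
  else if PySem.Str.pyGet? remainder 0 != some '.' then false
  else remainder.toList.all (fun c => c == '.' || PySem.Chars.isalnum c)

-- ===== PRECONDITION & SPEC =====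
def Spec_is_valid_nlmcn_remainder_py (remainder : String) (out : Bool) : Prop := out = is_valid_nlmcn_remainder_py_alt remainder
instance (remainder : String) (out : Bool) : Decidable (Spec_is_valid_nlmcn_remainder_py remainder out) := by unfold Spec_is_valid_nlmcn_remainder_py; infer_instance

-- ===== CLAIM (what is proved, stated in full; the proofs are below) =====
def Claim_equal_is_valid_nlmcn_remainder_py : Prop := ∀ (remainder : String), Dom_is_valid_nlmcn_remainder_py remainder → Spec_is_valid_nlmcn_remainder_py remainder (is_valid_nlmcn_remainder_py remainder)

-- ===== LEMMAS AND PROOFS =====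

-- A nonempty-or-empty segment check equals the flat all-alnum check on that segment.
theorem seg_check_eq (seg : List Char) :
    (seg.isEmpty || PySem.Chars.strIsalnum seg) = seg.all PySem.Chars.isalnum := by
  cases seg <;> simp [PySem.Chars.strIsalnum]

-- splitOn.go accumulates: the reversed accumulator is a prefix of the result.
theorem go_acc_prefix (fuel : Nat) (l cur : List Char) (acc : List (List Char)) :
    ∃ res, PySem.Chars.splitOn.go ['.'] fuel l cur acc = acc.reverse ++ res := by
  induction fuel generalizing l cur acc with
  | zero => exact ⟨[cur.reverse ++ l], by simp [PySem.Chars.splitOn.go]⟩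
  | succ fuel ih =>
    cases l with
    | nil => exact ⟨[cur.reverse], by simp [PySem.Chars.splitOn.go]⟩
    | cons c rest =>
      by_cases h : List.isPrefixOf ['.'] (c :: rest)
      · obtain ⟨res, hres⟩ := ih rest [] (cur.reverse :: acc)
        refine ⟨cur.reverse :: res, ?_⟩
        simp [PySem.Chars.splitOn.go, h, hres]
      · obtain ⟨res, hres⟩ := ih rest (c :: cur) acc
        refine ⟨res, ?_⟩
        simp [PySem.Chars.splitOn.go, h, hres]

-- The all-alnum check over the segments produced by splitOn.go equals the flat scan.
theorem go_all (fuel : Nat) (l cur : List Char) (acc : List (List Char))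
    (hf : l.length < fuel) :
    (PySem.Chars.splitOn.go ['.'] fuel l cur acc).all (fun seg => seg.all PySem.Chars.isalnum)
      = (acc.all (fun seg => seg.all PySem.Chars.isalnum)
          && cur.all PySem.Chars.isalnum
          && l.all (fun c => c == '.' || PySem.Chars.isalnum c)) := by
  induction fuel generalizing l cur acc with
  | zero => omega
  | succ fuel ih =>
    cases l with
    | nil =>
      simp [PySem.Chars.splitOn.go, List.all_reverse, Bool.and_comm]
    | cons c rest =>
      by_cases hc : c = '.'
      · have h : List.isPrefixOf ['.'] (c :: rest) = true := by
          simp [List.isPrefixOf, hc]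
        rw [show PySem.Chars.splitOn.go ['.'] (fuel+1) (c :: rest) cur acc
              = PySem.Chars.splitOn.go ['.'] fuel rest [] (cur.reverse :: acc) by
            simp [PySem.Chars.splitOn.go, h]]
        rw [ih rest [] (cur.reverse :: acc) (by simpa using Nat.lt_of_succ_lt_succ hf)]
        subst hc
        simp [List.all_reverse]
        ac_rfl
      · have h : List.isPrefixOf ['.'] (c :: rest) = false := by
          simp [List.isPrefixOf]
          exact fun h' => hc h'.symm
        rw [show PySem.Chars.splitOn.go ['.'] (fuel+1) (c :: rest) cur acc
              = PySem.Chars.splitOn.go ['.'] fuel rest (c :: cur) acc by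
            simp [PySem.Chars.splitOn.go, h]]
        rw [ih rest (c :: cur) acc (by simpa using Nat.lt_of_succ_lt_succ hf)]
        have hcb : (c == '.') = false := by simpa using hc
        simp [hcb]
        ac_rfl

-- ===== VERDICT (by name: the statement is the Claim_ definition above) =====
theorem is_valid_nlmcn_remainder_py_spec : Claim_equal_is_valid_nlmcn_remainder_py := by
  intro remainder _
  unfold Spec_is_valid_nlmcn_remainder_py is_valid_nlmcn_remainder_py is_valid_nlmcn_remainder_py_alt
  cases hcs : remainder.toList with
  | nil => simp
  | cons c rest =>
    have hget : PySem.Str.pyGet? remainder 0 = some c := by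
      simp [hcs]
    have hsw : PySem.Str.startswith remainder "." = (c == '.') := by
      rcases hc : c == '.' with _ | _
      · simp at hc
        refine Bool.eq_false_iff.mpr ?_
        intro hsw'
        have := (PySem.Chars.startswith_iff remainder.toList ".".toList).mp (by simpa using hsw')
        rcases this with ⟨t, ht⟩
        rw [hcs] at ht
        have : c = '.' := by simpa using congrArg (List.head? ·) ht.symm
        exact hc this
      · simp at hc
        subst hc
        refine (PySem.Chars.startswith_iff remainder.toList ".".toList).mpr ?_
        rw [hcs]; exact ⟨rest, by simp⟩
    rw [hsw, hget]
    simp only [List.isEmpty_cons, Bool.false_eq_true, if_false]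
    rcases hc : c == '.' with _ | _
    · simp [hc, bne]
    · have hc' : c = '.' := eq_of_beq hc
      subst hc'
      simp only [Bool.not_true, Bool.false_eq_true, if_false, bne_self_eq_false]
      have hstep : PySem.Chars.splitOn ('.' :: rest) ['.']
          = PySem.Chars.splitOn.go ['.'] (rest.length + 1) rest [] [[]] := by
        simp [PySem.Chars.splitOn, PySem.Chars.splitOn.go, List.isPrefixOf]
      obtain ⟨res, hres⟩ := go_acc_prefix (rest.length + 1) rest [] [[]]
      have hall := go_all (rest.length + 1) rest [] ([[]]) (by omega)
      rw [hres] at hall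
      have htail : (PySem.Chars.splitOn ('.' :: rest) ['.']).tail = res := by
        rw [hstep, hres]; simp
      calc (PySem.Chars.splitOn ('.' :: rest) ['.']).tail.all
              (fun seg => seg.isEmpty || PySem.Chars.strIsalnum seg)
          = res.all (fun seg => seg.all PySem.Chars.isalnum) := by
            rw [htail]; simp only [seg_check_eq]
        _ = (('.' :: rest).all (fun c => c == '.' || PySem.Chars.isalnum c)) := by
            simpa using hall
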